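-- pv_equiv track=rewrite | github.com/Wildst/AdventOfCode | 2015/day_15.py | generate_calories_cookies
-- ===== SOURCE A (Python) =====
-- def generate_calories_cookies( ingredients, calories, space ):
--     if len( ingredients ) == 1:
--         if ingredients[ 0 ][ -1 ] * space == calories:
--             return [ [ space ] ]
--         else:
--             return []
--
--     options = []
--     i = 0
--     while i < space and ingredients[ 0 ][ -1 ] * i < calories:
--         for option in generate_calories_cookies( ingredients[1:], calories - ingredients[0][-1]*i, space - i ):
--             options.append( [ i ] + option )
--         i += 1
--     return options
-- ===== SOURCE B (Python) =====
-- def _quantities(last, cal, sp):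
--     # quantities i that the problem admits at this position: 0 <= i < sp,
--     # scanning upward until the calorie budget is exhausted
--     qs = []
--     i = 0
--     while i < sp and last * i < cal:
--         qs.append(i)
--         i += 1
--     return qs
--
--
-- def generate_calories_cookies(ingredients, calories, space):
--     # iterative level-wise expansion: keep all partial allocations (prefix,
--     # calories left, space left), extend them one ingredient at a time, then
--     # close each with the forced last quantity if the calories match exactly
--     states = [([], calories, space)]
--     for ing in ingredients[:-1]:
--         last = ing[-1]
--         states = [(p + [i], c - last * i, s - i)
--                   for (p, c, s) in states
--                   for i in _quantities(last, c, s)]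
--     last = ingredients[-1][-1]
--     return [p + [s] for (p, c, s) in states if last * s == c]
-- ===== Notes on version B (the rewrite author's own statement) =====
-- stated objective: alternative
-- what changed: Replaces A's top-down recursion (one recursive call per partial allocation) with a single iterative level-wise pass that carries the whole frontier of partial allocations (prefix, calories left, space left) across the ingredients and closes it with a final filter on the last ingredient.
-- outside the precondition, e.g. on generate_calories_cookies([], 5, 0): A returns [], B raises IndexError; on generate_calories_cookies([[1], []], 5, 0): A returns [], B raises IndexError
import Mathlib
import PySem

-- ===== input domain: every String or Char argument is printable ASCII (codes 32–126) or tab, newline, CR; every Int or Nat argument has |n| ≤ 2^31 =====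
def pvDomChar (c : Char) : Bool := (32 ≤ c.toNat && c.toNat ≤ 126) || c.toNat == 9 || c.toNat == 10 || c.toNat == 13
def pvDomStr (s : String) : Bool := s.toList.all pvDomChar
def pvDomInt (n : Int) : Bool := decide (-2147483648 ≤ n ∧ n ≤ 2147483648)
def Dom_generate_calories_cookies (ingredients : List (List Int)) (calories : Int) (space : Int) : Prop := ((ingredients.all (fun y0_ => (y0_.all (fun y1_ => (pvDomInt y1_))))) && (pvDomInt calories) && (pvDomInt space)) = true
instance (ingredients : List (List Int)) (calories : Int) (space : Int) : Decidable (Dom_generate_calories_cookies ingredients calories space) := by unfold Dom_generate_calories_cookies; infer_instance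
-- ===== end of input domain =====

-- B replaces A's top-down recursion by one iterative level-wise pass over the
-- ingredients carrying the whole frontier of partial allocations (objective: alternative).

-- ===== PORT A =====

-- ingredients[k][-1] (0 as default; inputs hitting the default are outside Pre_)
def pvLast (l : List Int) : Int := (PySem.List.pyGet? l (-1)).getD 0

-- A's 'while i < space and ingredients[0][-1]*i < calories' loop; `recfn` is the
-- recursive call on ingredients[1:]; fuel = space.toNat bounds the iterations (i < space).
def pvAWhile (recfn : Int → Int → List (List Int)) (last calories space : Int)
    (i : Int) (fuel : Nat) (acc : List (List Int)) : List (List Int) :=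
  match fuel with
  | 0 => acc
  | fuel + 1 =>
    if i < space ∧ last * i < calories then
      pvAWhile recfn last calories space (i + 1) fuel
        (acc ++ (recfn (calories - last * i) (space - i)).map (fun opt => i :: opt))
    else acc

def generate_calories_cookies (ingredients : List (List Int)) (calories : Int) (space : Int) : List (List Int) :=
  match ingredients with
  | [] => []  -- Python raises here (outside Pre_)
  | [ing] => if pvLast ing * space = calories then [[space]] else []
  | ing :: rest =>
      pvAWhile (fun c s => generate_calories_cookies rest c s) (pvLast ing) calories space
        0 space.toNat []

-- ===== PORT B =====

-- Source B's _quantities while loop (fuel = sp.toNat bounds the iterations, i < sp)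
def pvQWhile (last cal sp i : Int) (fuel : Nat) (acc : List Int) : List Int :=
  match fuel with
  | 0 => acc
  | fuel + 1 =>
    if i < sp ∧ last * i < cal then
      pvQWhile last cal sp (i + 1) fuel (acc ++ [i])
    else acc

def pvQuantities (last cal sp : Int) : List Int := pvQWhile last cal sp 0 sp.toNat []

-- one step of Source B's for-loop: expand every state by every admitted quantity
def pvBStep (states : List (List Int × Int × Int)) (ing : List Int) : List (List Int × Int × Int) :=
  let last := pvLast ing
  states.flatMap (fun st =>
    (pvQuantities last st.2.1 st.2.2).map (fun i => (st.1 ++ [i], st.2.1 - last * i, st.2.2 - i)))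

def generate_calories_cookies_alt (ingredients : List (List Int)) (calories : Int) (space : Int) : List (List Int) :=
  let states := (PySem.List.slice ingredients none (some (-1))).foldl pvBStep [([], calories, space)]
  let last := pvLast ((PySem.List.pyGet? ingredients (-1)).getD [])
  states.filterMap (fun st => if last * st.2.2 = st.2.1 then some (st.1 ++ [st.2.2]) else none)

-- ===== PRECONDITION & SPEC =====
-- Pre_ excludes empty ingredient lists and lists containing an empty ingredient row:
-- on those inputs Python A raises IndexError except when its loop body is never reached
-- (space <= 0, where it returns []), and B's natural last-element lookups raise
-- IndexError on all of them.
def Pre_generate_calories_cookies (ingredients : List (List Int)) (calories : Int) (space : Int) : Prop :=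
  ingredients ≠ [] ∧ ∀ l ∈ ingredients, l ≠ []
instance (ingredients : List (List Int)) (calories : Int) (space : Int) : Decidable (Pre_generate_calories_cookies ingredients calories space) := by unfold Pre_generate_calories_cookies; infer_instance

def pvWitness_generate_calories_cookies : List (List Int) × Int × Int := ([[3, 0, 2], [1, 5]], 10, 4)

def Spec_generate_calories_cookies (ingredients : List (List Int)) (calories : Int) (space : Int) (out : List (List Int)) : Prop := out = generate_calories_cookies_alt ingredients calories space
instance (ingredients : List (List Int)) (calories : Int) (space : Int) (out : List (List Int)) : Decidable (Spec_generate_calories_cookies ingredients calories space out) := by unfold Spec_generate_calories_cookies; infer_instance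

-- ===== CLAIM (what is proved, stated in full; the proofs are below) =====
def Claim_equal_generate_calories_cookies : Prop := ∀ (ingredients : List (List Int)) (calories : Int) (space : Int), Dom_generate_calories_cookies ingredients calories space → Pre_generate_calories_cookies ingredients calories space → Spec_generate_calories_cookies ingredients calories space (generate_calories_cookies ingredients calories space)

-- ===== LEMMAS AND PROOFS =====

theorem pvQWhile_acc (last cal sp i : Int) (fuel : Nat) (acc : List Int) :
    pvQWhile last cal sp i fuel acc = acc ++ pvQWhile last cal sp i fuel [] := by
  induction fuel generalizing i acc with
  | zero => simp [pvQWhile]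
  | succ f ih =>
    simp only [pvQWhile]
    split
    · rw [ih (i+1) (acc ++ [i]), ih (i+1) ([] ++ [i])]; simp
    · simp

-- A's while loop equals: collect the admitted quantities, then flatMap the recursive results
theorem pvAWhile_eq (recfn : Int → Int → List (List Int)) (last cal sp : Int)
    (i : Int) (fuel : Nat) (acc : List (List Int)) :
    pvAWhile recfn last cal sp i fuel acc =
      acc ++ (pvQWhile last cal sp i fuel []).flatMap
        (fun j => (recfn (cal - last * j) (sp - j)).map (fun opt => j :: opt)) := by
  induction fuel generalizing i acc with
  | zero => simp [pvAWhile, pvQWhile]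
  | succ f ih =>
    simp only [pvAWhile, pvQWhile]
    split
    · rw [ih, pvQWhile_acc last cal sp (i+1) f ([] ++ [i])]
      simp
    · simp

-- the frontier step distributes over appending frontiers
theorem foldl_pvBStep_append (ings : List (List Int)) (s1 s2 : List (List Int × Int × Int)) :
    ings.foldl pvBStep (s1 ++ s2) = ings.foldl pvBStep s1 ++ ings.foldl pvBStep s2 := by
  induction ings generalizing s1 s2 with
  | nil => simp
  | cons ing rest ih =>
    simp only [List.foldl_cons]
    rw [← ih]
    simp [pvBStep]

theorem foldl_pvBStep_nil (ings : List (List Int)) : ings.foldl pvBStep [] = [] := by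
  induction ings with
  | nil => rfl
  | cons ing rest ih => simp [pvBStep, ih]

-- a stored prefix only prepends to every result of the rest of the pass
theorem pvBStep_map (p : List Int) (states : List (List Int × Int × Int)) (ing : List Int) :
    pvBStep (states.map (fun st => (p ++ st.1, st.2))) ing
      = (pvBStep states ing).map (fun st => (p ++ st.1, st.2)) := by
  simp [pvBStep, List.flatMap_map, List.map_flatMap, List.map_map, Function.comp_def,
    List.append_assoc]

theorem foldl_pvBStep_map (ings : List (List Int)) (states : List (List Int × Int × Int)) (p : List Int) :
    ings.foldl pvBStep (states.map (fun st => (p ++ st.1, st.2)))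
      = (ings.foldl pvBStep states).map (fun st => (p ++ st.1, st.2)) := by
  induction ings generalizing states with
  | nil => rfl
  | cons ing rest ih => simp [pvBStep_map, ih]

-- B on ing :: rest (rest nonempty) = flatMap over the admitted first quantities
theorem altB_cons (ing : List Int) (rest : List (List Int)) (hne : rest ≠ []) (cal sp : Int) :
    generate_calories_cookies_alt (ing :: rest) cal sp =
      (pvQuantities (pvLast ing) cal sp).flatMap
        (fun j => (generate_calories_cookies_alt rest (cal - pvLast ing * j) (sp - j)).map
          (fun opt => j :: opt)) := by
  unfold generate_calories_cookies_alt
  rw [PySem.List.slice_to_neg_one, PySem.List.slice_to_neg_one,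
    List.dropLast_cons_of_ne_nil hne]
  have hlast : (PySem.List.pyGet? (ing :: rest) (-1)).getD []
      = (PySem.List.pyGet? rest (-1)).getD [] := by
    rw [PySem.List.pyGet?_neg_one, PySem.List.pyGet?_neg_one]
    cases rest with
    | nil => exact absurd rfl hne
    | cons a l => rfl
  rw [hlast]
  simp only [List.foldl_cons]
  have hstep : pvBStep [(([] : List Int), cal, sp)] ing
      = (pvQuantities (pvLast ing) cal sp).map
          (fun j => (([j] : List Int), cal - pvLast ing * j, sp - j)) := by
    simp [pvBStep]
  rw [hstep]
  induction pvQuantities (pvLast ing) cal sp with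
  | nil => simp [foldl_pvBStep_nil]
  | cons q qs ihq =>
    simp only [List.map_cons, List.flatMap_cons]
    rw [show (([q], cal - pvLast ing * q, sp - q)
          :: qs.map (fun j => (([j] : List Int), cal - pvLast ing * j, sp - j)))
        = [(([q] : List Int), cal - pvLast ing * q, sp - q)]
          ++ qs.map (fun j => (([j] : List Int), cal - pvLast ing * j, sp - j)) from rfl]
    rw [foldl_pvBStep_append, List.filterMap_append, ihq]
    congr 1
    rw [show ([(([q] : List Int), cal - pvLast ing * q, sp - q)] : List (List Int × Int × Int))
        = [(([] : List Int), cal - pvLast ing * q, sp - q)].map (fun st => ([q] ++ st.1, st.2))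
        from rfl]
    rw [foldl_pvBStep_map, List.filterMap_map, List.map_filterMap]
    apply List.filterMap_congr
    intro st _
    by_cases hc : pvLast ((PySem.List.pyGet? rest (-1)).getD []) * st.2.2 = st.2.1 <;> simp [hc]

-- the core correspondence on nonempty ingredient lists
theorem pvMain (ingredients : List (List Int)) (calories space : Int)
    (h : ingredients ≠ []) :
    generate_calories_cookies ingredients calories space =
      generate_calories_cookies_alt ingredients calories space := by
  induction ingredients generalizing calories space with
  | nil => exact absurd rfl h
  | cons ing rest ih =>
    match rest with
    | [] =>
      show (if pvLast ing * space = calories then [[space]] else []) = _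
      unfold generate_calories_cookies_alt
      rw [PySem.List.slice_to_neg_one]
      by_cases hc : pvLast ing * space = calories <;>
        simp [hc, PySem.List.pyGet?_neg_one]
    | ing2 :: rest2 =>
      have hne : (ing2 :: rest2 : List (List Int)) ≠ [] := by simp
      show pvAWhile _ _ _ _ 0 space.toNat [] = _
      rw [pvAWhile_eq, altB_cons ing (ing2 :: rest2) hne]
      simp only [List.nil_append, pvQuantities]
      exact List.flatMap_congr (fun j _ => by rw [ih _ _ hne])

-- ===== VERDICT (by name: the statement is the Claim_ definition above) =====
theorem generate_calories_cookies_spec : Claim_equal_generate_calories_cookies := by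
  intro ingredients calories space _hDom hPre
  exact pvMain ingredients calories space hPre.1
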